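-- pv_equiv track=rewrite | github.com/symbol-signal/sensation | src/sensation/sen0395/__init__.py | range_segments
-- ===== SOURCE A (Python) =====
-- def range_segments(params):
--     """
--     Validate and process range segment parameters (for "Sensor Detection Area Configuration" command).
--
--     Args:
--         params (List[int]): List of range segment parameters.
--
--     Returns:
--         List[Tuple[int, int]]: List of range segment tuples (start, end).
--
--     Raises:
--         ValueError: If the segment parameters are invalid.
--     """
--     if len(params) % 2 != 0:
--         raise ValueError('Missing end index of a sensing area')
--     if params[0] < 0 or params[-1] > 127:
--         raise ValueError('Segment start indices must be >= 0 and end indices <= 127')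
--
--     segments = []
--     for idx, param in enumerate(params):
--         if idx > 0 and params[idx - 1] >= param:
--             raise ValueError('Index value must be greater than previous value')
--         if idx % 2 == 0:
--             segments.append((param, params[idx + 1]))
--
--     return segments
-- ===== SOURCE B (Python) =====
-- def range_segments(params):
--     """
--     Validate and process range segment parameters (for "Sensor Detection Area Configuration" command).
--     """
--     if len(params) % 2 != 0:
--         raise ValueError('Missing end index of a sensing area')
--     if params[0] < 0 or params[-1] > 127:
--         raise ValueError('Segment start indices must be >= 0 and end indices <= 127')
--     # strictly increasing  <=>  the list equals the sorted list of its distinct values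
--     if sorted(set(params)) != params:
--         raise ValueError('Index value must be greater than previous value')
--     return [(params[i], params[i + 1]) for i in range(0, len(params), 2)]
-- ===== Notes on version B (the rewrite author's own statement) =====
-- stated objective: alternative
-- what changed: A's single interleaved enumerate loop (per-index adjacent comparison mixed with pair building) is replaced by a set+sort characterisation of monotonicity (params is strictly increasing iff sorted(set(params)) == params) followed by a standalone stride-2 pairing comprehension.
import Mathlib
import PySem

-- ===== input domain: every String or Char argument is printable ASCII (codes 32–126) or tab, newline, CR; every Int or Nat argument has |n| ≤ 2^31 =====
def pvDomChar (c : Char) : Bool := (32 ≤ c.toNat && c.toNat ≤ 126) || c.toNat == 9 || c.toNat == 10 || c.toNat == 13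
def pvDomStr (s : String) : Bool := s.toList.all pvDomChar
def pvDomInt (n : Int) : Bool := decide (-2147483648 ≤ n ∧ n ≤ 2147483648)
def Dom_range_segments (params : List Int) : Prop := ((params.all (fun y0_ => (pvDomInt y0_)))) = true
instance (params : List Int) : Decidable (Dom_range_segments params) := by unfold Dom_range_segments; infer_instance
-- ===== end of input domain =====

-- B replaces A's interleaved enumerate loop by a set+sort characterisation of strict
-- monotonicity (sorted(set(params)) == params) plus a standalone stride-2 pairing pass.

-- ===== PORT A =====
-- loop over `enumerate(params)`: recursion on the remaining list carrying the index.
-- `raise` paths return [] — they are excluded by Pre_range_segments.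
def rsA_go (params : List Int) : Nat → List Int → List (Int × Int) → List (Int × Int)
  | _, [], segments => segments
  | idx, param :: rest, segments =>
    if idx > 0 ∧ (PySem.List.pyGet? params ((idx : Int) - 1)).getD 0 ≥ param then
      []  -- raise ValueError('Index value must be greater than previous value')
    else
      let segments :=
        if idx % 2 = 0 then
          match PySem.List.pyGet? params ((idx : Int) + 1) with
          | some nxt => segments ++ [(param, nxt)]
          | none => []  -- IndexError (unreachable: even length)
        else segments
      rsA_go params (idx + 1) rest segments

def range_segments (params : List Int) : List (Int × Int) :=
  if params.length % 2 ≠ 0 then []  -- raise ValueError('Missing end index ...')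
  else
    match PySem.List.pyGet? params 0, PySem.List.pyGet? params (-1) with
    | some p0, some pl =>
      if p0 < 0 ∨ pl > 127 then []  -- raise ValueError('Segment start indices ...')
      else rsA_go params 0 params []
    | _, _ => []  -- IndexError on empty params

-- ===== PORT B =====
def range_segments_alt (params : List Int) : List (Int × Int) :=
  if params.length % 2 ≠ 0 then []  -- raise ValueError('Missing end index ...')
  else
    match PySem.List.pyGet? params 0 with
    | none => []  -- IndexError on empty params
    | some p0 =>
      match PySem.List.pyGet? params (-1) with
      | none => []  -- IndexError on empty params
      | some pl =>
        if p0 < 0 ∨ pl > 127 then []  -- raise ValueError('Segment start indices ...')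
        else if PySem.List.sorted (PySem.Set.ofList params) (fun x => x) ≠ params then
          []  -- raise ValueError('Index value must be greater than previous value')
        else
          -- [(params[i], params[i+1]) for i in range(0, len(params), 2)]
          (PySem.List.pyRange 0 (params.length : Int) 2).map
            (fun i => (PySem.List.pyGetD params i 0, PySem.List.pyGetD params (i + 1) 0))

-- ===== PRECONDITION & SPEC =====
-- Pre_ = exactly the inputs where the Python A returns: nonempty (else IndexError on params[0]),
-- even length, first element ≥ 0, last ≤ 127, strictly increasing (else ValueError).
def Pre_range_segments (params : List Int) : Prop :=
  params ≠ [] ∧ params.length % 2 = 0 ∧ 0 ≤ params.headI ∧ params.getLastI ≤ 127 ∧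
    List.IsChain (· < ·) params
instance (params : List Int) : Decidable (Pre_range_segments params) := by
  unfold Pre_range_segments; infer_instance
def pvWitness_range_segments : List Int := [1, 3, 5, 100]

def Spec_range_segments (params : List Int) (out : List (Int × Int)) : Prop := out = range_segments_alt params
instance (params : List Int) (out : List (Int × Int)) : Decidable (Spec_range_segments params out) := by unfold Spec_range_segments; infer_instance

-- ===== CLAIM (what is proved, stated in full; the proofs are below) =====
def Claim_equal_range_segments : Prop := ∀ (params : List Int), Dom_range_segments params → Pre_range_segments params → Spec_range_segments params (range_segments params)

-- ===== LEMMAS AND PROOFS =====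

-- common shape: the two-at-a-time pairs of a list (proof-only helper)
def rsPairs : List Int → List (Int × Int)
  | a :: b :: t => (a, b) :: rsPairs t
  | _ => []

theorem chain'_get {l : List Int} (h : List.IsChain (· < ·) l) {i : Nat}
    (hi : i + 1 < l.length) : l[i] < l[i + 1] :=
  List.isChain_iff_getElem.mp h i hi

-- under strict monotonicity and even length, A's loop collects the two-at-a-time pairs
theorem rsA_go_eq (params : List Int) (hc : List.IsChain (· < ·) params)
    (hev : params.length % 2 = 0) :
    ∀ l idx acc, params.drop idx = l → idx % 2 = 0 →
      rsA_go params idx l acc = acc ++ rsPairs l := by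
  intro l
  induction l using rsPairs.induct with
  | case1 a b t ih =>
    intro idx acc hdrop hpar
    have hlenl : params.length - idx = t.length + 2 := by
      have := congrArg List.length hdrop; simpa using this
    have hlen : idx + 1 < params.length := by omega
    have ha : params[idx] = a := by
      have h0 : params[idx + 0]? = some a := by rw [← List.getElem?_drop, hdrop]; rfl
      simpa [List.getElem?_eq_getElem (show idx < params.length by omega)] using h0
    have hb : params[idx + 1] = b := by
      have h1 : params[idx + 1]? = some b := by rw [← List.getElem?_drop, hdrop]; rfl
      simpa [List.getElem?_eq_getElem hlen] using h1
    have hdrop2 : params.drop (idx + 2) = t := by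
      have h2 : (params.drop idx).drop 2 = t := by rw [hdrop]; rfl
      simpa [List.drop_drop, Nat.add_comm] using h2
    have hguard1 : ¬ (idx > 0 ∧ (PySem.List.pyGet? params ((idx : Int) - 1)).getD 0 ≥ a) := by
      rintro ⟨hpos, hge⟩
      have hidx1 : (idx : Int) - 1 = ((idx - 1 : Nat) : Int) := by omega
      rw [hidx1, PySem.List.pyGet?_natCast, List.getElem?_eq_getElem (by omega)] at hge
      have hlt' : params[idx - 1] < params[idx] := by
        have := chain'_get hc (i := idx - 1) (by omega)
        simpa [Nat.sub_add_cancel hpos] using this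
      simp [ha] at hlt' hge; omega
    have hget1 : PySem.List.pyGet? params ((idx : Int) + 1) = some b := by
      have hcast : (idx : Int) + 1 = ((idx + 1 : Nat) : Int) := by omega
      rw [hcast, PySem.List.pyGet?_natCast, List.getElem?_eq_getElem hlen, hb]
    have hguard2 : ¬ (idx + 1 > 0 ∧ (PySem.List.pyGet? params (((idx + 1 : Nat) : Int) - 1)).getD 0 ≥ b) := by
      rintro ⟨_, hge⟩
      have hidx : ((idx + 1 : Nat) : Int) - 1 = ((idx : Nat) : Int) := by omega
      rw [hidx, PySem.List.pyGet?_natCast, List.getElem?_eq_getElem (by omega)] at hge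
      have hlt' := chain'_get hc (i := idx) hlen
      simp [ha, hb] at hlt' hge; omega
    rw [rsA_go, if_neg hguard1]
    simp only [hpar, hget1]
    rw [rsA_go, if_neg hguard2]
    have hodd : ¬ (idx + 1) % 2 = 0 := by omega
    simp only [if_neg hodd, if_pos trivial]
    rw [show idx + 1 + 1 = idx + 2 from rfl,
      ih (idx + 2) (acc ++ [(a, b)]) hdrop2 (by omega)]
    simp [rsPairs]
  | case2 l hne =>
    intro idx acc hdrop hpar
    rcases l with _ | ⟨a, _ | ⟨b, t⟩⟩
    · simp [rsA_go, rsPairs]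
    · exfalso
      have := congrArg List.length hdrop
      simp at this
      omega
    · exact (hne a b t rfl).elim

theorem rsPairs_length (l : List Int) : (rsPairs l).length = l.length / 2 := by
  induction l using rsPairs.induct with
  | case1 a b t ih => simp [rsPairs, ih]; omega
  | case2 l hne =>
    rcases l with _ | ⟨a, _ | ⟨b, t⟩⟩
    · simp [rsPairs]
    · simp [rsPairs]
    · exact (hne a b t rfl).elim

theorem rsPairs_getElem (l : List Int) (k : Nat) (hk : k < (rsPairs l).length)
    (h1 : 2 * k < l.length) (h2 : 2 * k + 1 < l.length) :
    (rsPairs l)[k] = (l[2 * k], l[2 * k + 1]) := by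
  induction l using rsPairs.induct generalizing k with
  | case1 a b t ih =>
    cases k with
    | zero => simp [rsPairs]
    | succ k =>
      simp only [rsPairs, List.getElem_cons_succ]
      rw [ih k (by simpa [rsPairs] using hk) (by simp at h1 ⊢; omega) (by simp at h2 ⊢; omega)]
      simp only [Nat.mul_succ, show ∀ m : Nat, m + 2 = m + 1 + 1 from fun m => by omega,
        List.getElem_cons_succ]
  | case2 l hne =>
    rcases l with _ | ⟨a, _ | ⟨b, t⟩⟩
    · simp [rsPairs] at hk
    · simp [rsPairs] at hk
    · exact (hne a b t rfl).elim

-- B's stride-2 comprehension produces the two-at-a-time pairs (even length)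
theorem rsB_map_eq (params : List Int) (hev : params.length % 2 = 0) :
    (PySem.List.pyRange 0 (params.length : Int) 2).map
        (fun i => (PySem.List.pyGetD params i 0, PySem.List.pyGetD params (i + 1) 0))
      = rsPairs params := by
  rw [PySem.List.pyRange_of_pos 0 ((params.length : Int)) (s := 2) (by omega), List.map_map]
  apply List.ext_getElem
  · simp [rsPairs_length]
    split_ifs with h
    · omega
    · omega
  · intro k hk1 hk2
    have hcnt : k < params.length / 2 := by
      simp at hk1
      split_ifs at hk1 with h
      · omega
      · omega
    have h2 : 2 * k + 1 < params.length := by omega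
    rw [rsPairs_getElem params k hk2 (by omega) h2]
    simp only [List.getElem_map, List.getElem_range, Function.comp]
    have e2 : (0 : Int) + 2 * (k : Int) + 1 = ((2 * k + 1 : Nat) : Int) := by push_cast; ring
    have e1 : (0 : Int) + 2 * (k : Int) = ((2 * k : Nat) : Int) := by push_cast; ring
    rw [e2, e1, PySem.List.pyGetD_natCast, PySem.List.pyGetD_natCast]
    rw [List.getD, List.getD, List.getElem?_eq_getElem (show 2 * k < params.length by omega),
      List.getElem?_eq_getElem h2]
    rfl

-- strictly increasing ⇒ sorted(set(params)) == params
theorem sorted_ofList_eq_self {l : List Int} (hc : List.IsChain (· < ·) l) :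
    PySem.List.sorted (PySem.Set.ofList l) (fun x => x) = l := by
  have hpw : l.Pairwise (· < ·) := List.isChain_iff_pairwise.mp hc
  have hnd : l.Nodup := hpw.imp (fun h => ne_of_lt h)
  rw [PySem.Set.ofList_eq_self_of_nodup l hnd]
  exact PySem.List.sorted_eq_of_perm_of_pairwise_lt l l (fun x => x) (List.Perm.refl l) hpw

-- ===== VERDICT (by name: the statement is the Claim_ definition above) =====
theorem range_segments_spec : Claim_equal_range_segments := by
  intro params _ ⟨hne, hev, _, _, hc⟩
  unfold Spec_range_segments range_segments range_segments_alt
  rw [if_neg (by omega), if_neg (by omega)]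
  obtain ⟨h0, t, rfl⟩ : ∃ h t, params = h :: t := by
    cases params with
    | nil => exact absurd rfl hne
    | cons h t => exact ⟨h, t, rfl⟩
  rw [PySem.List.pyGet?_zero_cons, PySem.List.pyGet?_neg_one,
    List.getLast?_eq_some_getLast (by simp)]
  by_cases hb : h0 < 0 ∨ (h0 :: t).getLast (by simp) > 127
  · dsimp only
    rw [if_pos hb, if_pos hb]
  · dsimp only
    rw [if_neg hb, if_neg hb, if_neg (by simpa using sorted_ofList_eq_self hc),
      rsB_map_eq _ hev]
    exact rsA_go_eq (h0 :: t) hc hev (h0 :: t) 0 [] (by simp) (by simp)
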